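-- pv_equiv track=rewrite | github.com/tortagel/advent-of-code-2020 | day16.py | validate_tickets
-- ===== SOURCE A (Python) =====
-- def validate_tickets(rules, nearby_tickets):
--     error_rate, valid_tickets = 0, []
--     for nearby_ticket in nearby_tickets:
--         error = sum([value for value in nearby_ticket
--                         if all([(value < from1 or value > to1) and (value < from2 or value > to2)
--                                     for _, (from1, to1), (from2, to2) in rules])])
--         if error > 0: error_rate += error
--         else: valid_tickets.append(nearby_ticket)
--     return valid_tickets, error_rate
-- ===== SOURCE B (Python) =====
-- def validate_tickets(rules, nearby_tickets):
--     # Merge all rule ranges once into sorted intervals, then test each value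
--     # against the merged intervals instead of scanning every rule per value.
--     spans = sorted([r for _, r1, r2 in rules for r in (r1, r2)], key=lambda s: s[0])
--     merged = []
--     for lo, hi in spans:
--         if merged and lo <= merged[-1][1]:
--             if hi > merged[-1][1]:
--                 merged[-1] = (merged[-1][0], hi)
--         else:
--             merged.append((lo, hi))
--     error_rate, valid_tickets = 0, []
--     for ticket in nearby_tickets:
--         error = sum(v for v in ticket if not any(lo <= v <= hi for lo, hi in merged))
--         if error > 0:
--             error_rate += error
--         else:
--             valid_tickets.append(ticket)
--     return valid_tickets, error_rate
-- ===== Notes on version B (the rewrite author's own statement) =====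
-- stated objective: faster
-- what changed: B precomputes the union of all rule ranges once (sort by lower bound, merge into ordered disjoint intervals) and tests each ticket value against the short merged-interval list with an early-exiting any(), instead of re-scanning every rule and building two list comprehensions per value as A does.
import Mathlib
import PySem

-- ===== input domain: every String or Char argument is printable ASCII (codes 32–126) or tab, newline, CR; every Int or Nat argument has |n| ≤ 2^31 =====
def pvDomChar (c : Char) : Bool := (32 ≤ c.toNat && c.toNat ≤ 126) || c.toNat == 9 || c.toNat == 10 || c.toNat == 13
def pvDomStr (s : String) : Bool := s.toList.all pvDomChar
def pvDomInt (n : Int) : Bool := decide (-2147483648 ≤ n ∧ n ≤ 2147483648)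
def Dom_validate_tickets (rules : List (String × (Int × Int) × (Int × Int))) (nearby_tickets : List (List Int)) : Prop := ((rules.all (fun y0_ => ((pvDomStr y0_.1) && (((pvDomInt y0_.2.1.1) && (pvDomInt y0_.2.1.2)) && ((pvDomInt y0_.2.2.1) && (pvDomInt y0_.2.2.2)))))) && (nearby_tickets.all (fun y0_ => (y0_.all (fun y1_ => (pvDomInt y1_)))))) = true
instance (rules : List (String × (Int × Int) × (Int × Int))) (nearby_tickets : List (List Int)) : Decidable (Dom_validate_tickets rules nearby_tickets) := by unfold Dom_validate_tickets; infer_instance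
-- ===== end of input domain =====

-- B merges all rule ranges once into ordered intervals and tests each ticket value
-- against the merged intervals instead of scanning every rule per value (objective: alternative).

-- ===== PORT A =====
-- value is kept when ALL rules reject it (outside both of the rule's ranges)
def vtAValid (rules : List (String × (Int × Int) × (Int × Int))) (value : Int) : Bool :=
  rules.all (fun r =>
    decide ((value < r.2.1.1 ∨ value > r.2.1.2) ∧ (value < r.2.2.1 ∨ value > r.2.2.2)))

def validate_tickets (rules : List (String × (Int × Int) × (Int × Int))) (nearby_tickets : List (List Int)) : List (List Int) × Int :=
  let st := nearby_tickets.foldl (fun (st : Int × List (List Int)) nearby_ticket =>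
      let error : Int := (nearby_ticket.filter (fun value => vtAValid rules value)).sum
      if error > 0 then (st.1 + error, st.2) else (st.1, st.2 ++ [nearby_ticket]))
    (0, [])
  (st.2, st.1)

-- ===== PORT B =====
-- the two ranges of every rule, flattened
def vtSpans (rules : List (String × (Int × Int) × (Int × Int))) : List (Int × Int) :=
  rules.flatMap (fun r => [r.2.1, r.2.2])

-- one step of the interval-merge loop; `merged` is kept reversed (head = Python's merged[-1])
def vtMergeStep (merged : List (Int × Int)) (p : Int × Int) : List (Int × Int) :=
  match merged with
  | [] => [p]
  | (l, h) :: rest =>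
    if p.1 ≤ h then (if h < p.2 then (l, p.2) :: rest else (l, h) :: rest)
    else p :: (l, h) :: rest

-- spans sorted by lower bound, merged into intervals (reversed back into build order)
def vtMerged (rules : List (String × (Int × Int) × (Int × Int))) : List (Int × Int) :=
  ((PySem.List.sorted (vtSpans rules) (fun s => s.1) false).foldl vtMergeStep []).reverse

def vtCovered (merged : List (Int × Int)) (v : Int) : Bool :=
  merged.any (fun q => decide (q.1 ≤ v ∧ v ≤ q.2))

def validate_tickets_alt (rules : List (String × (Int × Int) × (Int × Int))) (nearby_tickets : List (List Int)) : List (List Int) × Int :=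
  let merged := vtMerged rules
  let st := nearby_tickets.foldl (fun (st : Int × List (List Int)) ticket =>
      let error : Int := (ticket.filter (fun v => !(vtCovered merged v))).sum
      if error > 0 then (st.1 + error, st.2) else (st.1, st.2 ++ [ticket]))
    (0, [])
  (st.2, st.1)

-- ===== PRECONDITION & SPEC =====
def Spec_validate_tickets (rules : List (String × (Int × Int) × (Int × Int))) (nearby_tickets : List (List Int)) (out : List (List Int) × Int) : Prop := out = validate_tickets_alt rules nearby_tickets
instance (rules : List (String × (Int × Int) × (Int × Int))) (nearby_tickets : List (List Int)) (out : List (List Int) × Int) : Decidable (Spec_validate_tickets rules nearby_tickets out) := by unfold Spec_validate_tickets; infer_instance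

-- ===== CLAIM (what is proved, stated in full; the proofs are below) =====
def Claim_equal_validate_tickets : Prop := ∀ (rules : List (String × (Int × Int) × (Int × Int))) (nearby_tickets : List (List Int)), Dom_validate_tickets rules nearby_tickets → Spec_validate_tickets rules nearby_tickets (validate_tickets rules nearby_tickets)

-- ===== LEMMAS AND PROOFS =====

-- `v` lies in some interval of `l`
def vtCov (v : Int) (l : List (Int × Int)) : Prop := ∃ p ∈ l, p.1 ≤ v ∧ v ≤ p.2

theorem vtMergeStep_fst (acc : List (Int × Int)) (p : Int × Int) :
    ∀ q ∈ vtMergeStep acc p, q.1 = p.1 ∨ ∃ q' ∈ acc, q.1 = q'.1 := by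
  intro q hq
  unfold vtMergeStep at hq
  match acc with
  | [] => simp at hq; simp [hq]
  | (l, h) :: rest =>
    simp only at hq
    split_ifs at hq <;> rcases List.mem_cons.mp hq with hq | hq
    · rcases hq with rfl; exact Or.inr ⟨(l, h), by simp, rfl⟩
    · exact Or.inr ⟨q, List.mem_cons_of_mem _ hq, rfl⟩
    · rcases hq with rfl; exact Or.inr ⟨(l, h), by simp, rfl⟩
    · exact Or.inr ⟨q, List.mem_cons_of_mem _ hq, rfl⟩
    · rcases hq with rfl; exact Or.inl rfl
    · exact Or.inr ⟨q, hq, rfl⟩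

theorem vtMergeStep_cov (v : Int) (acc : List (Int × Int)) (p : Int × Int)
    (hle : ∀ q ∈ acc, q.1 ≤ p.1) :
    (vtCov v (vtMergeStep acc p) ↔ vtCov v acc ∨ (p.1 ≤ v ∧ v ≤ p.2)) := by
  unfold vtMergeStep
  match acc with
  | [] => simp [vtCov]
  | (l, h) :: rest =>
    have hl : l ≤ p.1 := hle (l, h) (by simp)
    simp only
    split_ifs with h1 h2
    · simp only [vtCov, List.mem_cons]
      constructor
      · rintro ⟨q, hq | hq, hc⟩
        · rcases hq with rfl
          simp only at hc
          by_cases hvh : v ≤ h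
          · exact Or.inl ⟨(l, h), Or.inl rfl, hc.1, hvh⟩
          · exact Or.inr ⟨by omega, hc.2⟩
        · exact Or.inl ⟨q, Or.inr hq, hc⟩
      · rintro (⟨q, hq | hq, hc⟩ | hc)
        · rcases hq with rfl
          exact ⟨(l, p.2), Or.inl rfl, by simp only at hc ⊢; omega⟩
        · exact ⟨q, Or.inr hq, hc⟩
        · exact ⟨(l, p.2), Or.inl rfl, by omega⟩
    · simp only [vtCov, List.mem_cons]
      constructor
      · rintro ⟨q, hq, hc⟩; exact Or.inl ⟨q, hq, hc⟩
      · rintro (⟨q, hq, hc⟩ | hc)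
        · exact ⟨q, hq, hc⟩
        · exact ⟨(l, h), Or.inl rfl, by omega⟩
    · simp only [vtCov, List.mem_cons]
      constructor
      · rintro ⟨q, hq | hq, hc⟩
        · rcases hq with rfl; exact Or.inr hc
        · exact Or.inl ⟨q, hq, hc⟩
      · rintro (⟨q, hq, hc⟩ | hc)
        · exact ⟨q, Or.inr hq, hc⟩
        · exact ⟨p, Or.inl rfl, hc⟩

theorem vtFoldl_cov (v : Int) :
    ∀ (spans acc : List (Int × Int)),
      spans.Pairwise (fun a b => a.1 ≤ b.1) →
      (∀ q ∈ acc, ∀ p ∈ spans, q.1 ≤ p.1) →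
      (vtCov v (spans.foldl vtMergeStep acc) ↔ vtCov v acc ∨ vtCov v spans) := by
  intro spans
  induction spans with
  | nil => intro acc _ _; simp [vtCov]
  | cons p rest ih =>
    intro acc hpw hacc
    have hpw' := (List.pairwise_cons.mp hpw)
    have hstep := vtMergeStep_cov v acc p (fun q hq => hacc q hq p (by simp))
    have hacc' : ∀ q ∈ vtMergeStep acc p, ∀ r ∈ rest, q.1 ≤ r.1 := by
      intro q hq r hr
      rcases vtMergeStep_fst acc p q hq with h | ⟨q', hq', h⟩
      · rw [h]; exact hpw'.1 r hr
      · rw [h]; exact hacc q' hq' r (by simp [hr])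
    rw [List.foldl_cons, ih (vtMergeStep acc p) hpw'.2 hacc', hstep]
    simp only [vtCov, List.mem_cons]
    constructor
    · rintro ((hc | hc) | ⟨q, hq, hc⟩)
      · exact Or.inl hc
      · exact Or.inr ⟨p, Or.inl rfl, hc⟩
      · exact Or.inr ⟨q, Or.inr hq, hc⟩
    · rintro (hc | ⟨q, hq | hq, hc⟩)
      · exact Or.inl (Or.inl hc)
      · rcases hq with rfl; exact Or.inl (Or.inr hc)
      · exact Or.inr ⟨q, hq, hc⟩

theorem vtMerged_cov (rules : List (String × (Int × Int) × (Int × Int))) (v : Int) :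
    (vtCov v (vtMerged rules) ↔ vtCov v (vtSpans rules)) := by
  unfold vtMerged
  have hrev : vtCov v (((PySem.List.sorted (vtSpans rules) (fun s => s.1) false).foldl vtMergeStep []).reverse)
      ↔ vtCov v ((PySem.List.sorted (vtSpans rules) (fun s => s.1) false).foldl vtMergeStep []) := by
    simp [vtCov]
  rw [hrev, vtFoldl_cov v _ [] (PySem.List.sorted_pairwise _ _) (by simp)]
  simp only [vtCov, PySem.List.mem_sorted]
  tauto

theorem vtPred_eq (rules : List (String × (Int × Int) × (Int × Int))) (v : Int) :
    vtAValid rules v = !(vtCovered (vtMerged rules) v) := by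
  rw [Bool.eq_iff_iff]
  have hm := vtMerged_cov rules v
  simp only [vtAValid, vtCovered, List.all_eq_true, Bool.not_eq_true', List.any_eq_false,
    decide_eq_true_eq]
  constructor
  · intro hall q hq hc
    have : vtCov v (vtSpans rules) := hm.mp ⟨q, hq, hc⟩
    rcases this with ⟨p, hp, hcp⟩
    simp only [vtSpans, List.mem_flatMap] at hp
    rcases hp with ⟨r, hr, hp⟩
    have := hall r hr
    simp at hp
    rcases hp with rfl | rfl <;> omega
  · intro hnone r hr
    constructor
    · by_contra hc
      have : vtCov v (vtMerged rules) := hm.mpr ⟨r.2.1, List.mem_flatMap.mpr ⟨r, hr, by simp⟩, by omega⟩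
      rcases this with ⟨q, hq, hcq⟩
      exact hnone q hq hcq
    · by_contra hc
      have : vtCov v (vtMerged rules) := hm.mpr ⟨r.2.2, List.mem_flatMap.mpr ⟨r, hr, by simp⟩, by omega⟩
      rcases this with ⟨q, hq, hcq⟩
      exact hnone q hq hcq

-- ===== VERDICT (by name: the statement is the Claim_ definition above) =====
theorem validate_tickets_spec : Claim_equal_validate_tickets := by
  intro rules nearby_tickets _
  unfold Spec_validate_tickets validate_tickets validate_tickets_alt
  have hp : (fun value => vtAValid rules value) = (fun v => !(vtCovered (vtMerged rules) v)) :=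
    funext (fun v => vtPred_eq rules v)
  simp only [hp]
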